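-- pv_equiv track=rewrite | github.com/chillionaire128/TDD | AOC_17/day2.py | row_checksum
-- ===== SOURCE A (Python) =====
-- def row_checksum(row):
--     """
--     Finds the diffrence between the largest and smallest numbers on a row
--     """
--     largest = row[0]
--     smallest = row[0]
--     for num in row:
--         if num > largest:
--             largest = num
--         if num < smallest:
--             smallest = num
--     return largest - smallest
-- ===== SOURCE B (Python) =====
-- def row_checksum(row):
--     """
--     Finds the diffrence between the largest and smallest numbers on a row
--     """
--     s = sorted(row)
--     return s[-1] - s[0]
-- ===== Notes on version B (the rewrite author's own statement) =====
-- stated objective: idiomatic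
-- what changed: B sorts the row and reads max and min from the two ends of the sorted copy instead of tracking both with a running-comparison scan.
import Mathlib
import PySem

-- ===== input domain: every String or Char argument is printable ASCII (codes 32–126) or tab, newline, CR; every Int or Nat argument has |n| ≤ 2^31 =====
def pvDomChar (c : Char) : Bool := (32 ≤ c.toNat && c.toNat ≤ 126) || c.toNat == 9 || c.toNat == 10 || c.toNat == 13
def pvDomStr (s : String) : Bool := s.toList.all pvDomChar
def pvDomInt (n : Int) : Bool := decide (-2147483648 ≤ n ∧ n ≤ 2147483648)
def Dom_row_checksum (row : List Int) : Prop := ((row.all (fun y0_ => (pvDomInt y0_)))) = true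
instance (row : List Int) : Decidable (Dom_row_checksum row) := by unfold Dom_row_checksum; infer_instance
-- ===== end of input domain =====

-- B sorts the row and reads max/min from the two ends of the sorted copy instead of a running-comparison scan (idiomatic alternative, same result).


-- ===== PORT A =====
-- largest = row[0]; smallest = row[0]; then one scan updating both; return largest - smallest
def row_checksum (row : List Int) : Int :=
  let largest0 := PySem.List.pyGetD row 0 0
  let smallest0 := PySem.List.pyGetD row 0 0
  let p := row.foldl
    (fun (st : Int × Int) num =>
      (if num > st.1 then num else st.1, if num < st.2 then num else st.2))
    (largest0, smallest0)
  p.1 - p.2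

-- ===== PORT B =====
-- s = sorted(row); return s[-1] - s[0]
def row_checksum_alt (row : List Int) : Int :=
  let s := PySem.List.sorted row (fun x => x) false
  PySem.List.pyGetD s (-1) 0 - PySem.List.pyGetD s 0 0

-- ===== PRECONDITION & SPEC =====
-- Pre_ excludes only the empty row, where both Pythons raise IndexError (row[0] / s[-1]).
def Pre_row_checksum (row : List Int) : Prop := row ≠ []
instance (row : List Int) : Decidable (Pre_row_checksum row) := by unfold Pre_row_checksum; infer_instance
def pvWitness_row_checksum : List Int := [3, 1, 4]

def Spec_row_checksum (row : List Int) (out : Int) : Prop := out = row_checksum_alt row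
instance (row : List Int) (out : Int) : Decidable (Spec_row_checksum row out) := by unfold Spec_row_checksum; infer_instance

-- ===== CLAIM (what is proved, stated in full; the proofs are below) =====
def Claim_equal_row_checksum : Prop := ∀ (row : List Int), Dom_row_checksum row → Pre_row_checksum row → Spec_row_checksum row (row_checksum row)

-- ===== LEMMAS AND PROOFS =====

-- a foldl with min returns m when m bounds the seed and all elements and occurs among them
theorem foldl_min_eq (l : List Int) (a m : Int) (h1 : m ≤ a) (h2 : ∀ x ∈ l, m ≤ x)
    (h3 : m = a ∨ m ∈ l) : l.foldl min a = m := by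
  induction l generalizing a with
  | nil => simp [List.foldl]; exact (h3.resolve_right (by simp)).symm
  | cons y ys ih =>
    have hy : m ≤ y := h2 y (by simp)
    rcases h3 with rfl | hmem
    · exact ih (min m y) (le_min le_rfl hy) (fun x hx => h2 x (by simp [hx])) (Or.inl (by omega))
    · rcases List.mem_cons.mp hmem with rfl | hmem'
      · exact ih (min a m) (by omega) (fun x hx => h2 x (by simp [hx])) (Or.inl (by omega))
      · exact ih (min a y) (le_min h1 hy) (fun x hx => h2 x (by simp [hx])) (Or.inr hmem')

theorem foldl_max_eq (l : List Int) (a m : Int) (h1 : a ≤ m) (h2 : ∀ x ∈ l, x ≤ m)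
    (h3 : m = a ∨ m ∈ l) : l.foldl max a = m := by
  induction l generalizing a with
  | nil => simp [List.foldl]; exact (h3.resolve_right (by simp)).symm
  | cons y ys ih =>
    have hy : y ≤ m := h2 y (by simp)
    rcases h3 with rfl | hmem
    · exact ih (max m y) (by omega) (fun x hx => h2 x (by simp [hx])) (Or.inl (by omega))
    · rcases List.mem_cons.mp hmem with rfl | hmem'
      · exact ih (max a m) (by omega) (fun x hx => h2 x (by simp [hx])) (Or.inl (by omega))
      · exact ih (max a y) (max_le h1 hy) (fun x hx => h2 x (by simp [hx])) (Or.inr hmem')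

-- in a ≤-sorted list every element is bounded by the last one
theorem le_getLast_of_pairwise (l : List Int) (h : l.Pairwise (· ≤ ·)) (hne : l ≠ []) :
    ∀ y ∈ l, y ≤ l.getLast hne := by
  induction l with
  | nil => simp at hne
  | cons a t ih =>
    intro y hy
    cases t with
    | nil => simp at hy; simp [hy, List.getLast]
    | cons b s =>
      have hpw := (List.pairwise_cons.mp h).2
      have ha : ∀ x ∈ b :: s, a ≤ x := (List.pairwise_cons.mp h).1
      rw [List.getLast_cons (by simp)]
      rcases List.mem_cons.mp hy with rfl | hy'
      · exact le_trans (ha _ (List.getLast_mem _)) le_rfl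
      · exact ih hpw (by simp) y hy'

theorem row_checksum_eq_alt (row : List Int) (hne : row ≠ []) :
    row_checksum row = row_checksum_alt row := by
  obtain ⟨a, t, rfl⟩ := List.exists_cons_of_ne_nil hne
  set s := PySem.List.sorted (a :: t) (fun x => x) false with hs
  have hperm : s.Perm (a :: t) := PySem.List.sorted_perm _ _ _
  have hsne : s ≠ [] := by
    intro h; have := hperm.length_eq; simp [h] at this
  have hpw : s.Pairwise (· ≤ ·) := by
    simpa using PySem.List.sorted_pairwise (xs := a :: t) (key := fun x => x)
  obtain ⟨m, u, hmu⟩ := List.exists_cons_of_ne_nil hsne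
  have hmem_iff : ∀ x, x ∈ s ↔ x ∈ a :: t := fun x => hperm.mem_iff
  have hmin_le : ∀ y ∈ a :: t, m ≤ y := by
    intro y hy
    exact PySem.List.key_head_sorted_le (xs := a :: t) (key := fun x => x) (hs.symm.trans hmu) y hy
  have hmin_mem : m ∈ a :: t := (hmem_iff m).mp (by simp [hmu])
  set M := s.getLast hsne with hM
  have hmax_ge : ∀ y ∈ a :: t, y ≤ M := by
    intro y hy
    exact le_getLast_of_pairwise s hpw hsne y ((hmem_iff y).mpr hy)
  have hmax_mem : M ∈ a :: t := (hmem_iff M).mp (List.getLast_mem hsne)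
  -- evaluate port B
  have hB : row_checksum_alt (a :: t) = M - m := by
    show PySem.List.pyGetD s (-1) 0 - PySem.List.pyGetD s 0 0 = M - m
    rw [PySem.List.pyGetD_neg_one s 0 hsne]
    have hz : PySem.List.pyGetD s 0 0 = m := by
      rw [hmu]; exact PySem.List.pyGetD_zero_cons _ _ _
    rw [hz]
  -- evaluate port A
  have hA : row_checksum (a :: t) = M - m := by
    show ((a :: t).foldl
      (fun (st : Int × Int) num =>
        (if num > st.1 then num else st.1, if num < st.2 then num else st.2))
      (PySem.List.pyGetD (a :: t) 0 0, PySem.List.pyGetD (a :: t) 0 0)).1 -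
      ((a :: t).foldl
      (fun (st : Int × Int) num =>
        (if num > st.1 then num else st.1, if num < st.2 then num else st.2))
      (PySem.List.pyGetD (a :: t) 0 0, PySem.List.pyGetD (a :: t) 0 0)).2 = M - m
    rw [PySem.List.foldl_prod_mk (f := fun s e => if e > s then e else s)
        (g := fun s e => if e < s then e else s)]
    have hmaxf : (fun (s e : Int) => if e > s then e else s) = max := by
      funext s e; simp [max_def]; omega
    have hminf : (fun (s e : Int) => if e < s then e else s) = min := by
      funext s e; simp [min_def]; omega
    rw [hmaxf, hminf, PySem.List.pyGetD_zero_cons]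
    have h1 : (a :: t).foldl max a = M :=
      foldl_max_eq _ _ _ (hmax_ge a (by simp)) hmax_ge (Or.inr hmax_mem)
    have h2 : (a :: t).foldl min a = m :=
      foldl_min_eq _ _ _ (hmin_le a (by simp)) hmin_le (Or.inr hmin_mem)
    rw [h1, h2]
  rw [hA, hB]

-- ===== VERDICT (by name: the statement is the Claim_ definition above) =====
theorem row_checksum_spec : Claim_equal_row_checksum := by
  intro row _ hpre
  exact row_checksum_eq_alt row hpre
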